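-- pv_equiv track=rewrite | github.com/az2181036/campus | 2019/网易/牛牛的背包问题.py | dfs
-- ===== SOURCE A (Python) =====
-- def dfs(arr, val_limit):
--     if len(arr) == 0:
--         return 1
--     if sum(arr) < val_limit:
--         return 2**len(arr)
--     if val_limit > arr[0]:
--         return dfs(arr[1:], val_limit-arr[0]) + dfs(arr[1:], val_limit)
--     else:
--         return dfs(arr[1:], val_limit)
-- ===== SOURCE B (Python) =====
-- def dfs(arr, val_limit):
--     # Breadth-first over positions, merging equal remaining limits in a dict
--     # (limit -> number of branches), instead of A's branch-per-subset recursion.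
--     total = 0
--     level = {val_limit: 1}
--     rem = sum(arr)      # sum of the remaining suffix (including the current element)
--     m = len(arr)        # length of the remaining suffix
--     for a in arr:
--         nxt = {}
--         for L, c in level.items():
--             if rem < L:
--                 total += c * 2 ** m
--             else:
--                 if L > a:
--                     nxt[L - a] = nxt.get(L - a, 0) + c
--                 nxt[L] = nxt.get(L, 0) + c
--         rem -= a
--         m -= 1
--         level = nxt
--     return total + sum(level.values())
-- ===== Notes on version B (the rewrite author's own statement) =====
-- stated objective: faster
-- what changed: A's branch-per-call DFS recursion is replaced by a breadth-first pass over positions that keeps a dict mapping each distinct remaining limit to its branch count, so exponentially many identical subproblems collapse into one dict entry.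
import Mathlib
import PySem

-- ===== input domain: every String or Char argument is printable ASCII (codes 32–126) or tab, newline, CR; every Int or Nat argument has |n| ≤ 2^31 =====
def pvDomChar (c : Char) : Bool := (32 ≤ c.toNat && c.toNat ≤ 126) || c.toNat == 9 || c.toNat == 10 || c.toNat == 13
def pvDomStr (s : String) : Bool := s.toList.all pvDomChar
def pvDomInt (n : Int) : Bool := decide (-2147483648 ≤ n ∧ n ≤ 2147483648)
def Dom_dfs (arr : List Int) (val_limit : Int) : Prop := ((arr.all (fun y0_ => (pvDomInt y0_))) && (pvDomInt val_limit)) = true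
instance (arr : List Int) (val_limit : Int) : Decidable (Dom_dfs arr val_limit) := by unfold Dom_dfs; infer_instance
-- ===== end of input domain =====

-- B replaces A's branch-per-call DFS recursion by a level-by-level pass that merges equal
-- remaining limits in a dict (limit -> branch count); same return value on every input.

-- ===== PORT A =====
def dfs : List Int → Int → Int
  | [], _ => 1
  | a :: rest, val_limit =>
    if (a :: rest).sum < val_limit then 2 ^ (a :: rest).length
    else if val_limit > a then dfs rest (val_limit - a) + dfs rest val_limit
    else dfs rest val_limit

-- ===== PORT B =====
-- body of Source B's inner loop `for L, c in level.items(): ...` (state: (total, nxt))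
def dfsAltInner (a rem m : Int) (tn : Int × PySem.Dict Int Int) (p : Int × Int) :
    Int × PySem.Dict Int Int :=
  if rem < p.1 then (tn.1 + p.2 * 2 ^ m.toNat, tn.2)
  else
    let d1 := if p.1 > a then tn.2.insert (p.1 - a) (tn.2.getD (p.1 - a) 0 + p.2) else tn.2
    (tn.1, d1.insert p.1 (d1.getD p.1 0 + p.2))

-- body of Source B's outer loop `for a in arr: ...` (state: (total, level, rem, m))
def dfsAltOuter (st : Int × PySem.Dict Int Int × Int × Int) (a : Int) :
    Int × PySem.Dict Int Int × Int × Int :=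
  let step := st.2.1.items.foldl (dfsAltInner a st.2.2.1 st.2.2.2)
    (st.1, (PySem.Dict.empty : PySem.Dict Int Int))
  (step.1, step.2, st.2.2.1 - a, st.2.2.2 - 1)

def dfs_alt (arr : List Int) (val_limit : Int) : Int :=
  let fin := arr.foldl dfsAltOuter
    ((0 : Int), (PySem.Dict.empty : PySem.Dict Int Int).insert val_limit 1, arr.sum,
      (arr.length : Int))
  fin.1 + fin.2.1.values.sum

-- ===== PRECONDITION & SPEC =====
def Spec_dfs (arr : List Int) (val_limit : Int) (out : Int) : Prop := out = dfs_alt arr val_limit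
instance (arr : List Int) (val_limit : Int) (out : Int) : Decidable (Spec_dfs arr val_limit out) := by unfold Spec_dfs; infer_instance

-- ===== CLAIM (what is proved, stated in full; the proofs are below) =====
def Claim_equal_dfs : Prop := ∀ (arr : List Int) (val_limit : Int), Dom_dfs arr val_limit → Spec_dfs arr val_limit (dfs arr val_limit)

-- ===== LEMMAS AND PROOFS =====

-- weighted sum of f over a level's (limit, count) entries
def Wl (ps : List (Int × Int)) (f : Int → Int) : Int := (ps.map (fun p => p.2 * f p.1)).sum

theorem Wl_nil (f : Int → Int) : Wl [] f = 0 := rfl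

theorem Wl_cons (p : Int × Int) (ps : List (Int × Int)) (f : Int → Int) :
    Wl (p :: ps) f = p.2 * f p.1 + Wl ps f := by simp [Wl]

theorem Wl_append (xs ys : List (Int × Int)) (f : Int → Int) :
    Wl (xs ++ ys) f = Wl xs f + Wl ys f := by simp [Wl]

theorem map_replace_of_not_mem (l : List (Int × Int)) (k w : Int)
    (h : k ∉ l.map Prod.fst) :
    l.map (fun p => if p.1 == k then (k, w) else p) = l := by
  induction l with
  | nil => rfl
  | cons q tl ih =>
    simp only [List.map_cons, List.mem_cons, not_or] at h ⊢
    rw [if_neg (by simp only [beq_iff_eq]; exact fun h' => h.1 h'.symm), ih h.2]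

theorem Wl_map_replace (l : List (Int × Int)) (k w v0 : Int) (f : Int → Int)
    (hnd : (l.map Prod.fst).Nodup) (hv : (k, v0) ∈ l) :
    Wl (l.map (fun p => if p.1 == k then (k, w) else p)) f = Wl l f + (w - v0) * f k := by
  induction l with
  | nil => simp at hv
  | cons q tl ih =>
    simp only [List.map_cons, List.nodup_cons] at hnd
    rcases List.mem_cons.mp hv with h | h
    · subst h
      rw [List.map_cons, if_pos (by simp), map_replace_of_not_mem tl k w hnd.1,
        Wl_cons, Wl_cons]
      ring
    · have hq : q.1 ≠ k := by
        intro hk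
        exact hnd.1 (hk ▸ (List.mem_map.mpr ⟨(k, v0), h, rfl⟩))
      rw [List.map_cons, if_neg (by simp [hq]), Wl_cons, Wl_cons, ih hnd.2 h]
      ring

theorem keys_nodup_items (d : PySem.Dict Int Int) (hnd : d.keys.Nodup) :
    (d.items.map Prod.fst).Nodup := by
  have : d.keys = d.items.map Prod.fst := by
    simp [PySem.Dict.keys]
  rwa [this] at hnd

theorem Wl_insert_add (d : PySem.Dict Int Int) (hnd : d.keys.Nodup) (k c : Int) (f : Int → Int) :
    Wl (d.insert k (d.getD k 0 + c)).items f = Wl d.items f + c * f k := by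
  by_cases hc : d.contains k = true
  · obtain ⟨v0, hv0⟩ := Option.isSome_iff_exists.mp (by
      rw [← PySem.Dict.contains_eq_isSome_get? d k]; exact hc)
    have hmem : (k, v0) ∈ d.items := PySem.Dict.mem_items_of_get?_eq_some d hv0
    have hgetD : d.getD k 0 = v0 := PySem.Dict.getD_of_get?_eq_some d 0 hv0
    rw [PySem.Dict.items_insert_of_contains d _ hc,
      Wl_map_replace d.items k (d.getD k 0 + c) v0 f (keys_nodup_items d hnd) hmem, hgetD]
    ring
  · have hc' : d.contains k = false := by simpa using hc
    rw [PySem.Dict.items_insert_of_not_contains d _ hc',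
      PySem.Dict.getD_of_not_contains d _ hc', Wl_append]
    simp [Wl_cons, Wl_nil]

-- unfolding facts for A
theorem dfs_prune (a : Int) (rest : List Int) (L : Int) (h : (a :: rest).sum < L) :
    dfs (a :: rest) L = 2 ^ (a :: rest).length := by
  rw [dfs, if_pos h]

theorem dfs_both (a : Int) (rest : List Int) (L : Int) (h : ¬ (a :: rest).sum < L) (h2 : L > a) :
    dfs (a :: rest) L = dfs rest (L - a) + dfs rest L := by
  rw [dfs, if_neg h, if_pos h2]

theorem dfs_skip (a : Int) (rest : List Int) (L : Int) (h : ¬ (a :: rest).sum < L) (h2 : ¬ L > a) :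
    dfs (a :: rest) L = dfs rest L := by
  rw [dfs, if_neg h, if_neg h2]

-- the inner loop over one level's items preserves total + Wl, split off one level of A
theorem inner_fold (a : Int) (rest : List Int) (ps : List (Int × Int)) :
    ∀ (t : Int) (d : PySem.Dict Int Int), d.keys.Nodup →
      (ps.foldl (dfsAltInner a (a :: rest).sum ((a :: rest).length : Int)) (t, d)).2.keys.Nodup ∧
      (ps.foldl (dfsAltInner a (a :: rest).sum ((a :: rest).length : Int)) (t, d)).1 +
        Wl ((ps.foldl (dfsAltInner a (a :: rest).sum ((a :: rest).length : Int)) (t, d)).2.items)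
          (dfs rest) =
        t + Wl d.items (dfs rest) + Wl ps (dfs (a :: rest)) := by
  induction ps with
  | nil => intro t d hnd; exact ⟨hnd, by simp [Wl_nil]⟩
  | cons p tl ih =>
    intro t d hnd
    simp only [List.foldl_cons]
    by_cases hpr : (a :: rest).sum < p.1
    · rw [dfsAltInner, if_pos hpr]
      obtain ⟨h1, h2⟩ := ih (t + p.2 * 2 ^ (((a :: rest).length : Int)).toNat) d hnd
      refine ⟨h1, ?_⟩
      rw [h2, Wl_cons, dfs_prune a rest p.1 hpr, Int.toNat_natCast]
      ring
    · rw [dfsAltInner, if_neg hpr]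
      by_cases hbr : p.1 > a
      · simp only [if_pos hbr]
        have hnd1 : (d.insert (p.1 - a) (d.getD (p.1 - a) 0 + p.2)).keys.Nodup :=
          PySem.Dict.nodup_keys_insert _ _ _ hnd
        have hnd2 : ((d.insert (p.1 - a) (d.getD (p.1 - a) 0 + p.2)).insert p.1
            ((d.insert (p.1 - a) (d.getD (p.1 - a) 0 + p.2)).getD p.1 0 + p.2)).keys.Nodup :=
          PySem.Dict.nodup_keys_insert _ _ _ hnd1
        obtain ⟨h1, h2⟩ := ih t _ hnd2
        refine ⟨h1, ?_⟩
        rw [h2, Wl_insert_add _ hnd1, Wl_insert_add _ hnd, Wl_cons,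
          dfs_both a rest p.1 hpr hbr]
        ring
      · simp only [if_neg hbr]
        have hnd1 : (d.insert p.1 (d.getD p.1 0 + p.2)).keys.Nodup :=
          PySem.Dict.nodup_keys_insert _ _ _ hnd
        obtain ⟨h1, h2⟩ := ih t _ hnd1
        refine ⟨h1, ?_⟩
        rw [h2, Wl_insert_add _ hnd, Wl_cons, dfs_skip a rest p.1 hpr hbr]
        ring

-- the outer loop: rem/m always hold the remaining suffix's sum and length
theorem outer_fold (suffix : List Int) :
    ∀ (t : Int) (d : PySem.Dict Int Int), d.keys.Nodup →
      (suffix.foldl dfsAltOuter (t, d, suffix.sum, (suffix.length : Int))).1 +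
        ((suffix.foldl dfsAltOuter (t, d, suffix.sum, (suffix.length : Int))).2.1.values.sum : Int) =
        t + Wl d.items (dfs suffix) := by
  induction suffix with
  | nil =>
    intro t d hnd
    simp only [List.foldl_nil]
    have : Wl d.items (dfs []) = (d.values.sum : Int) := by
      simp [Wl, dfs, PySem.Dict.values]
    omega
  | cons a rest ih =>
    intro t d hnd
    obtain ⟨h1, h2⟩ := inner_fold a rest d.items t PySem.Dict.empty PySem.Dict.nodup_keys_empty
    have hsum : (a :: rest).sum - a = rest.sum := by simp [List.sum_cons]
    have hlen : ((a :: rest).length : Int) - 1 = (rest.length : Int) := by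
      simp [List.length_cons]
    simp only [List.foldl_cons, dfsAltOuter]
    rw [hsum, hlen, ih _ _ h1, h2]
    have hempty : (PySem.Dict.empty : PySem.Dict Int Int).items = [] := rfl
    rw [hempty, Wl_nil]
    ring

-- ===== VERDICT (by name: the statement is the Claim_ definition above) =====
theorem dfs_spec : Claim_equal_dfs := by
  intro arr val_limit _
  unfold Spec_dfs
  have hnd : ((PySem.Dict.empty : PySem.Dict Int Int).insert val_limit 1).keys.Nodup :=
    PySem.Dict.nodup_keys_insert _ _ _ PySem.Dict.nodup_keys_empty
  have h := outer_fold arr 0 ((PySem.Dict.empty : PySem.Dict Int Int).insert val_limit 1) hnd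
  have hitems : ((PySem.Dict.empty : PySem.Dict Int Int).insert val_limit 1).items
      = [(val_limit, 1)] := rfl
  rw [hitems] at h
  have h2 : dfs_alt arr val_limit = 0 + Wl [(val_limit, 1)] (dfs arr) := h
  rw [h2]
  simp [Wl]
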